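-- pv_equiv track=rewrite | github.com/aiannacc/goko-dominion-tools | gdt/logparse/gokoparse.py | scores_to_ranks
-- ===== SOURCE A (Python) =====
-- def scores_to_ranks(scores):
--     ranks = [0] * len(scores)
--     for i in range(len(scores)):
--         larger = set()
--         for j in range(len(scores)):
--             if scores[j] > scores[i]:
--                 larger.add(scores[j])
--         ranks[i] = len(larger) + 1
--     return(ranks)
-- ===== SOURCE B (Python) =====
-- def scores_to_ranks(scores):
--     rank = {v: i for i, v in enumerate(sorted(set(scores), reverse=True), 1)}
--     return [rank[v] for v in scores]
-- ===== Notes on version B (the rewrite author's own statement) =====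
-- stated objective: faster
-- what changed: Replaces the quadratic per-element scan that rebuilds a set of larger values for every index with one sort of the distinct scores descending and a dict mapping each value to its 1-based position, then a single lookup pass.
import Mathlib
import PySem

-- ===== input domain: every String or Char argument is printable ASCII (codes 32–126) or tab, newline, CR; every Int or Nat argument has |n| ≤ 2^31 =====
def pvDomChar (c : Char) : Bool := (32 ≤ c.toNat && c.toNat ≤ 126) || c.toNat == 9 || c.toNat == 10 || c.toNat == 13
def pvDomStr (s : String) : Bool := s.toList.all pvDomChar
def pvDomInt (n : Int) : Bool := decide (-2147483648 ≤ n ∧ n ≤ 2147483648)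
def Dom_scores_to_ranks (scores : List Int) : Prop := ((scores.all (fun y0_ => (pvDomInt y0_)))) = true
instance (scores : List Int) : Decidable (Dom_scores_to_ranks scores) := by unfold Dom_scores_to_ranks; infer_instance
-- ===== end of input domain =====

-- B replaces A's per-index rebuild of the set of larger values by one descending sort of the
-- distinct scores plus a value→rank dictionary and a single lookup pass (objective: faster).

-- ===== PORT A =====
def scores_to_ranks (scores : List Int) : List Int :=
  -- A fills ranks[i] independently for each i, so the fill-by-index loop is a map over range(len(scores))
  (PySem.List.pyRange 0 (PySem.List.len scores) 1).map (fun i =>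
    let larger : PySem.Set Int :=
      (PySem.List.pyRange 0 (PySem.List.len scores) 1).foldl (fun s j =>
        if PySem.List.pyGetD scores j 0 > PySem.List.pyGetD scores i 0 then
          PySem.Set.add s (PySem.List.pyGetD scores j 0)
        else s) PySem.Set.empty
    (larger.length : Int) + 1)

-- ===== PORT B =====
def scores_to_ranks_alt (scores : List Int) : List Int :=
  let desc := PySem.List.sorted (PySem.Set.ofList scores) (fun x => x) true
  let rank : PySem.Dict Int Int :=
    (PySem.List.enumerate desc 1).foldl (fun d p => d.insert p.2 p.1) PySem.Dict.empty
  -- rank[v]: every v of scores is a key of rank, so Python's KeyError branch is unreachable and getD is exact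
  scores.map (fun v => (rank.get? v).getD 0)

-- ===== PRECONDITION & SPEC =====
def Spec_scores_to_ranks (scores : List Int) (out : List Int) : Prop := out = scores_to_ranks_alt scores
instance (scores : List Int) (out : List Int) : Decidable (Spec_scores_to_ranks scores out) := by unfold Spec_scores_to_ranks; infer_instance

-- ===== CLAIM (what is proved, stated in full; the proofs are below) =====
def Claim_equal_scores_to_ranks : Prop := ∀ (scores : List Int), Dom_scores_to_ranks scores → Spec_scores_to_ranks scores (scores_to_ranks scores)

-- ===== LEMMAS AND PROOFS =====

-- A's inner loop: conditionally adding each element is Set.update with the filtered list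
theorem foldl_if_add (l : List Int) (x : Int) (s : PySem.Set Int) :
    l.foldl (fun s y => if x < y then PySem.Set.add s y else s) s
      = PySem.Set.update s (l.filter (fun y => x < y)) := by
  induction l generalizing s with
  | nil => rfl
  | cons a t ih =>
      simp only [List.foldl_cons, List.filter_cons]
      by_cases h : x < a
      · simp [h, ih, PySem.Set.update]
      · simp [h, ih]

-- distinct elements of a filtered list vs. filtered distinct elements: same count
theorem len_ofList_filter (l : List Int) (p : Int → Bool) :
    (PySem.Set.ofList (l.filter p)).length = (PySem.Set.ofList l).countP p := by
  rw [List.countP_eq_length_filter]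
  have h1 : (PySem.Set.ofList (l.filter p)).Nodup := PySem.Set.nodup_ofList _
  have h2 : ((PySem.Set.ofList l).filter p).Nodup := (PySem.Set.nodup_ofList l).filter p
  refine List.Perm.length_eq ?_
  rw [List.perm_ext_iff_of_nodup h1 h2]
  intro a
  simp [PySem.Set.mem_ofList, List.mem_filter]

-- a lookup falls through a fold of inserts whose keys avoid v
theorem get?_fold_insert_notmem (l : List (Int × Int)) (d : PySem.Dict Int Int) (v : Int)
    (h : v ∉ l.map (·.2)) :
    (l.foldl (fun d p => d.insert p.2 p.1) d).get? v = d.get? v := by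
  induction l generalizing d with
  | nil => rfl
  | cons a t ih =>
      simp only [List.map_cons, List.mem_cons, not_or] at h
      simp only [List.foldl_cons]
      rw [ih _ h.2, PySem.Dict.get?_insert_of_ne _ _ h.1]

-- a fold of inserts over distinct keys: lookup returns the stored value
theorem get?_fold_insert_mem (l : List (Int × Int)) (d : PySem.Dict Int Int) (i v : Int)
    (hnd : (l.map (·.2)).Nodup) (h : (i, v) ∈ l) :
    (l.foldl (fun d p => d.insert p.2 p.1) d).get? v = some i := by
  induction l generalizing d with
  | nil => simp at h
  | cons a t ih =>
      simp only [List.map_cons, List.nodup_cons] at hnd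
      rcases List.mem_cons.mp h with h1 | h1
      · subst h1
        simp only [List.foldl_cons]
        rw [get?_fold_insert_notmem _ _ _ hnd.1, PySem.Dict.get?_insert_self]
      · exact ih _ hnd.2 h1

-- 1-based position in a strictly descending list = 1 + number of larger elements
theorem idx_enum (l : List Int) (hl : l.Pairwise (· > ·)) (s i v : Int)
    (h : (i, v) ∈ PySem.List.enumerate l s) :
    i = s + (l.countP (fun y => v < y) : Int) := by
  induction l generalizing s with
  | nil => simp [PySem.List.enumerate_nil] at h
  | cons a t ih =>
      rw [List.pairwise_cons] at hl
      rw [PySem.List.enumerate_cons, List.mem_cons] at h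
      rcases h with h1 | h1
      · rw [Prod.ext_iff] at h1
        obtain ⟨hi, hv⟩ := h1
        subst hi; subst hv
        have h0 : t.countP (fun y => v < y) = 0 :=
          List.countP_eq_zero.mpr (fun y hy => by simpa using not_lt.mpr (le_of_lt (hl.1 y hy)))
        simp [h0]
      · have hv : v ∈ t := by
          have := PySem.List.map_snd_enumerate t (s + 1)
          exact this ▸ List.mem_map.mpr ⟨(i, v), h1, rfl⟩
        have hva : v < a := hl.1 v hv
        have := ih hl.2 (s + 1) h1
        rw [List.countP_cons]
        simp only [hva, decide_true]
        push_cast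
        omega

-- B's sorted distinct list is strictly descending
theorem desc_pairwise_gt (xs : List Int) :
    (PySem.List.sorted (PySem.Set.ofList xs) (fun x => x) true).Pairwise (· > ·) := by
  have hp := PySem.List.sorted_pairwise_rev (PySem.Set.ofList xs) (fun x => x)
  have hn : (PySem.List.sorted (PySem.Set.ofList xs) (fun x => x) true).Nodup :=
    (PySem.List.sorted_perm (PySem.Set.ofList xs) (fun x => x) true).nodup_iff.mpr
      (PySem.Set.nodup_ofList xs)
  exact (List.Pairwise.and hp hn).imp (fun h => lt_of_le_of_ne h.1 (Ne.symm h.2))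

-- the two ports agree on every input
theorem ranks_eq (scores : List Int) : scores_to_ranks scores = scores_to_ranks_alt scores := by
  have hA : scores_to_ranks scores
      = scores.map (fun x => (((PySem.Set.ofList (scores.filter (fun y => x < y))).length : Int) + 1)) := by
    unfold scores_to_ranks
    simp only [PySem.List.len_eq]
    rw [List.map_congr_left (fun i _ => by
      rw [PySem.List.foldl_pyRange_zero_pyGetD' scores 0
           (fun s y => if y > PySem.List.pyGetD scores i 0 then PySem.Set.add s y else s) PySem.Set.empty]
      simp only [gt_iff_lt]
      rw [foldl_if_add]
      rfl :
      ∀ i ∈ PySem.List.pyRange 0 (scores.length : Int) 1,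
        (let larger : PySem.Set Int :=
          (PySem.List.pyRange 0 (scores.length : Int) 1).foldl (fun s j =>
            if PySem.List.pyGetD scores j 0 > PySem.List.pyGetD scores i 0 then
              PySem.Set.add s (PySem.List.pyGetD scores j 0)
            else s) PySem.Set.empty
         ((larger.length : Int) + 1))
        = (fun x => (((PySem.Set.ofList (scores.filter (fun y => x < y))).length : Int) + 1))
            (PySem.List.pyGetD scores i 0))]
    rw [show (fun i => (fun x => (((PySem.Set.ofList (scores.filter (fun y => x < y))).length : Int) + 1))
            (PySem.List.pyGetD scores i 0))
        = (fun x => (((PySem.Set.ofList (scores.filter (fun y => x < y))).length : Int) + 1))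
            ∘ (fun i : Int => PySem.List.pyGetD scores i 0) from rfl]
    rw [← List.map_map, PySem.List.map_pyGetD_pyRange_zero']
  rw [hA]
  unfold scores_to_ranks_alt
  refine List.map_congr_left (fun v hv => ?_)
  have hvdesc : v ∈ PySem.List.sorted (PySem.Set.ofList scores) (fun x => x) true :=
    (PySem.List.mem_sorted _ _ _ _).mpr ((PySem.Set.mem_ofList _ _).mpr hv)
  obtain ⟨p, hp, hp2⟩ := List.mem_map.mp (by
    rw [PySem.List.map_snd_enumerate]; exact hvdesc :
    v ∈ (PySem.List.enumerate (PySem.List.sorted (PySem.Set.ofList scores) (fun x => x) true) 1).map (·.2))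
  have hkeys : ((PySem.List.enumerate (PySem.List.sorted (PySem.Set.ofList scores) (fun x => x) true) 1).map (·.2)).Nodup := by
    rw [PySem.List.map_snd_enumerate]
    exact (PySem.List.sorted_perm _ _ _).nodup_iff.mpr (PySem.Set.nodup_ofList scores)
  have hmem : (p.1, v) ∈ PySem.List.enumerate (PySem.List.sorted (PySem.Set.ofList scores) (fun x => x) true) 1 := by
    rw [← hp2]; exact hp
  have hget := get?_fold_insert_mem _ PySem.Dict.empty p.1 v hkeys hmem
  have hi := idx_enum _ (desc_pairwise_gt scores) 1 p.1 v hmem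
  have hcnt : (PySem.List.sorted (PySem.Set.ofList scores) (fun x => x) true).countP (fun y => v < y)
      = (PySem.Set.ofList scores).countP (fun y => v < y) :=
    (PySem.List.sorted_perm _ _ _).countP_eq _
  simp only [hget, Option.getD_some]
  rw [len_ofList_filter]
  omega

-- ===== VERDICT (by name: the statement is the Claim_ definition above) =====
theorem scores_to_ranks_spec : Claim_equal_scores_to_ranks := by
  intro scores _
  unfold Spec_scores_to_ranks
  exact ranks_eq scores
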